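-- pv_equiv track=rewrite | github.com/eai6/BeeVision | solitary_bee_hotels/scripts/process_tracking.py | getActivityRanges
-- ===== SOURCE A (Python) =====
-- def getActivityRanges(lst, element):
--     '''
--     Input:
--     lst: the list of motion coordinate detections on all frames
--     element: seperator between activity detections (0,0,0,0)
--
--     Output:
--     list with ranges of frame indexes of all detections
--     '''
--     occurrence_ranges = []
--     start_index = None
--
--     for i, item in enumerate(lst):
--         if item != element:
--             if start_index is None:
--                 start_index = i
--         else:
--             if start_index is not None:
--                 end_index = i - 1
--                 occurrence_ranges.append((start_index, end_index))
--                 start_index = None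
--
--     if start_index is not None:
--         # If the last element in the list is the target element
--         end_index = len(lst) - 1
--         occurrence_ranges.append((start_index, end_index))
--
--     return occurrence_ranges
-- ===== SOURCE B (Python) =====
-- def getActivityRanges(lst, element):
--     # Two-pointer span scan: skip separators, then jump over each whole
--     # non-separator run at once and emit its (start, end) boundary.
--     ranges = []
--     n = len(lst)
--     i = 0
--     while i < n:
--         if lst[i] == element:
--             i += 1
--             continue
--         j = i + 1
--         while j < n and lst[j] != element:
--             j += 1
--         ranges.append((i, j - 1))
--         i = j
--     return ranges
-- ===== Notes on version B (the rewrite author's own statement) =====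
-- stated objective: alternative
-- what changed: Replaced A's per-item state machine (Optional start_index updated on every element) with a two-pointer span scan that skips separators and jumps over each whole non-separator run, emitting its boundaries directly.
import Mathlib
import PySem

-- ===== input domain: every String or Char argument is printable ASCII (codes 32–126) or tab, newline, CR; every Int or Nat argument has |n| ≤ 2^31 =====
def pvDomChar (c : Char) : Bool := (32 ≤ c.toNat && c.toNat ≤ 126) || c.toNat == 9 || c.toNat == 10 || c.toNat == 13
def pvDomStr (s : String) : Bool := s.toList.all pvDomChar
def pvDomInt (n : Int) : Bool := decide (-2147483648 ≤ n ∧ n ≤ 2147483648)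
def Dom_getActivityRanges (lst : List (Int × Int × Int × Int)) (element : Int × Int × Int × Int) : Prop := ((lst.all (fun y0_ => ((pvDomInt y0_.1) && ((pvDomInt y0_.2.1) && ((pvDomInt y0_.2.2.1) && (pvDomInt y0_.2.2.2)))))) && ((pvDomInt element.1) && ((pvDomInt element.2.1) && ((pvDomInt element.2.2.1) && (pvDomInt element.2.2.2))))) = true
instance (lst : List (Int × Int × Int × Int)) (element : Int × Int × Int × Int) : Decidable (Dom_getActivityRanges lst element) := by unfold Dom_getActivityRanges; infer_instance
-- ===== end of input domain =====

-- B replaces A's per-item Optional-start state machine with a two-pointer span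
-- scan that jumps over whole non-separator runs (alternative decomposition).

-- ===== PORT A =====
-- A's for-loop over enumerate(lst) with state (occurrence_ranges, start_index),
-- transcribed as a structural recursion carrying index i and that same state.
def goA (element : Int × Int × Int × Int) : List (Int × Int × Int × Int) → Int → Option Int → List (Int × Int) → List (Int × Int)
  | [], i, start, acc =>
      match start with
      | none => acc
      | some s => acc ++ [(s, i - 1)]   -- i = len lst here, so i - 1 = len lst - 1
  | x :: xs, i, start, acc =>
      if x ≠ element then
        goA element xs (i + 1) (if start = none then some i else start) acc
      else
        match start with
        | none => goA element xs (i + 1) none acc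
        | some s => goA element xs (i + 1) none (acc ++ [(s, i - 1)])

def getActivityRanges (lst : List (Int × Int × Int × Int)) (element : Int × Int × Int × Int) : List (Int × Int) :=
  goA element lst 0 none []

-- ===== PORT B =====
-- length of the inner `while j < n and lst[j] != element` advance
def runLen (element : Int × Int × Int × Int) : List (Int × Int × Int × Int) → Nat
  | [] => 0
  | x :: xs => if x = element then 0 else 1 + runLen element xs

def goB (element : Int × Int × Int × Int) : List (Int × Int × Int × Int) → Int → List (Int × Int)
  | [], _ => []
  | x :: xs, i =>
      if x = element then goB element xs (i + 1)
      else
        let k := runLen element xs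
        (i, (i + 1 + k) - 1) :: goB element (xs.drop k) (i + 1 + k)
  termination_by l => l.length
  decreasing_by all_goals simp

def getActivityRanges_alt (lst : List (Int × Int × Int × Int)) (element : Int × Int × Int × Int) : List (Int × Int) :=
  goB element lst 0

-- ===== PRECONDITION & SPEC =====
def Spec_getActivityRanges (lst : List (Int × Int × Int × Int)) (element : Int × Int × Int × Int) (out : List (Int × Int)) : Prop := out = getActivityRanges_alt lst element
instance (lst : List (Int × Int × Int × Int)) (element : Int × Int × Int × Int) (out : List (Int × Int)) : Decidable (Spec_getActivityRanges lst element out) := by unfold Spec_getActivityRanges; infer_instance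

-- ===== CLAIM (what is proved, stated in full; the proofs are below) =====
def Claim_equal_getActivityRanges : Prop := ∀ (lst : List (Int × Int × Int × Int)) (element : Int × Int × Int × Int), Dom_getActivityRanges lst element → Spec_getActivityRanges lst element (getActivityRanges lst element)

-- ===== LEMMAS AND PROOFS =====

-- Combined invariant: A's state machine agrees with B's span scan, in both the
-- "outside a run" (start = none) and "inside a run started at s" states.
theorem goA_goB (element : Int × Int × Int × Int) (l : List (Int × Int × Int × Int)) :
    (∀ i acc, goA element l i none acc = acc ++ goB element l i) ∧
    (∀ i s acc, goA element l i (some s) acc =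
      acc ++ (s, i + (runLen element l : Int) - 1) ::
        goB element (l.drop (runLen element l)) (i + runLen element l)) := by
  induction l with
  | nil =>
      constructor
      · intro i acc; simp [goA, goB]
      · intro i s acc; simp [goA, goB, runLen]
  | cons x xs ih =>
      obtain ⟨ih1, ih2⟩ := ih
      constructor
      · intro i acc
        by_cases hx : x = element
        · simp [goA, goB, hx, ih1]
        · rw [goA, if_pos (by exact hx)]
          have hst : (if (none : Option Int) = none then some i else none) = some i := by simp
          rw [hst, ih2]
          simp only [goB, if_neg hx]
      · intro i s acc
        by_cases hx : x = element
        · rw [goA, if_neg (by simpa using hx)]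
          simp only [hx]
          rw [ih1]
          rw [runLen]
          simp [goB]
        · rw [goA, if_pos (by exact hx)]
          have hst : (if some s = none then some i else some s) = some s := by simp
          rw [hst, ih2]
          rw [runLen, if_neg hx]
          simp only [Nat.add_comm 1 (runLen element xs), List.drop_succ_cons]
          push_cast
          ring_nf

-- ===== VERDICT (by name: the statement is the Claim_ definition above) =====
theorem getActivityRanges_spec : Claim_equal_getActivityRanges := by
  intro lst element _
  unfold Spec_getActivityRanges getActivityRanges getActivityRanges_alt
  simpa using (goA_goB element lst).1 0 []
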